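-- pv_equiv track=rewrite | github.com/bruntonspall/uksnow | helpers.py | markup_message
-- ===== SOURCE A (Python) =====
-- def markup_message(message, query):
--     if "http://" in message.lower():
--         messageelements = message.split(" ")
--         newmessageelements = []
--         for messageelement in messageelements:
--             if messageelement[0:7].lower() == "http://":
--                 newmessageelements.append("<a href='"+ messageelement +"' target='_new'>"+ messageelement +"</a>")
--             else:
--                 newmessageelements.append(messageelement)
--         markedupmessage = " ".join(newmessageelements)
--     else:
--         markedupmessage = message
--     if "@" in markedupmessage:
--         messageelements = markedupmessage.split(" ")
--         newmessageelements = []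
--         for messageelement in messageelements:
--             if messageelement[0:1].lower() == "@":
--                 if len(messageelement) > 1:
--                     newmessageelements.append("<a href='http://twitter.com/"+ messageelement[1: len(messageelement)] +"' target='_new'>"+ messageelement +"</a>")
--             else:
--                 newmessageelements.append(messageelement)
--         markedupmessage = " ".join(newmessageelements)
--     if "#" in markedupmessage:
--         messageelements = markedupmessage.split(" ")
--         newmessageelements = []
--         for messageelement in messageelements:
--             if messageelement[0:1].lower() == "#":
--                 if len(messageelement) > 1:
--                     newmessageelements.append("<a href='http://search.twitter.com/search?q=%23"+ messageelement[1: len(messageelement)] +"'>"+ messageelement +"</a>")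
--             else:
--                 newmessageelements.append(messageelement)
--         markedupmessage = " ".join(newmessageelements)
--     return markedupmessage
-- ===== SOURCE B (Python) =====
-- def markup_message(message, query):
--     out = []
--     for tok in message.split(" "):
--         if tok[:7].lower() == "http://":
--             out.append("<a href='" + tok + "' target='_new'>" + tok + "</a>")
--         elif tok.startswith("@"):
--             if len(tok) > 1:
--                 out.append("<a href='http://twitter.com/" + tok[1:] + "' target='_new'>" + tok + "</a>")
--         elif tok.startswith("#"):
--             if len(tok) > 1:
--                 out.append("<a href='http://search.twitter.com/search?q=%23" + tok[1:] + "'>" + tok + "</a>")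
--         else:
--             out.append(tok)
--     return " ".join(out)
-- ===== Notes on version B (the rewrite author's own statement) =====
-- stated objective: simpler
-- what changed: A makes three sequential split/rebuild passes over the whole string (URLs, then @mentions, then #hashtags), re-splitting its own generated HTML; B splits once and classifies each token in a single loop (http:// prefix, @, #, or plain), which is safe because the pieces of a wrapped token never re-match a later prefix.
import Mathlib
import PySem

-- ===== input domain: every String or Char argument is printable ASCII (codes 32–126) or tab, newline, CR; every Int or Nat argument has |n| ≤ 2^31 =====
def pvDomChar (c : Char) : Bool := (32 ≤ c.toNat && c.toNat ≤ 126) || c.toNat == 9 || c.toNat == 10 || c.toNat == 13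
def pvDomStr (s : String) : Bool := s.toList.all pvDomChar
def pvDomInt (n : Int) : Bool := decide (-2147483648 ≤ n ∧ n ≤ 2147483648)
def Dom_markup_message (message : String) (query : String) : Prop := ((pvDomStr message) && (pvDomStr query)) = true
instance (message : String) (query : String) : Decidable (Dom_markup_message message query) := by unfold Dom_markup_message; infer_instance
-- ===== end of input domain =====

-- B replaces A's three sequential split/wrap/join passes by a single split with one classifying
-- loop over the tokens (objective: simpler); the return values are proved equal on all inputs.

-- ===== PORT A =====
-- literal transliteration of A: three guarded passes, each re-splitting the current string on " ",
-- rebuilding the element list left to right, and re-joining with " ".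
def markup_message (message : String) (query : String) : String :=
  let markedupmessage :=
    if PySem.Str.isIn "http://" (PySem.Str.lower message) then
      PySem.Str.join " " (((PySem.Str.split? message " ").getD []).foldl (fun acc messageelement =>
        if PySem.Str.lower (PySem.Str.slice messageelement (some 0) (some 7)) = "http://" then
          acc ++ ["<a href='" ++ messageelement ++ "' target='_new'>" ++ messageelement ++ "</a>"]
        else
          acc ++ [messageelement]) [])
    else message
  let markedupmessage :=
    if PySem.Str.isIn "@" markedupmessage then
      PySem.Str.join " " (((PySem.Str.split? markedupmessage " ").getD []).foldl (fun acc messageelement =>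
        if PySem.Str.lower (PySem.Str.slice messageelement (some 0) (some 1)) = "@" then
          (if 1 < PySem.Str.len messageelement then
            acc ++ ["<a href='http://twitter.com/" ++ PySem.Str.slice messageelement (some 1) (some (PySem.Str.len messageelement)) ++ "' target='_new'>" ++ messageelement ++ "</a>"]
          else acc)
        else
          acc ++ [messageelement]) [])
    else markedupmessage
  let markedupmessage :=
    if PySem.Str.isIn "#" markedupmessage then
      PySem.Str.join " " (((PySem.Str.split? markedupmessage " ").getD []).foldl (fun acc messageelement =>
        if PySem.Str.lower (PySem.Str.slice messageelement (some 0) (some 1)) = "#" then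
          (if 1 < PySem.Str.len messageelement then
            acc ++ ["<a href='http://search.twitter.com/search?q=%23" ++ PySem.Str.slice messageelement (some 1) (some (PySem.Str.len messageelement)) ++ "'>" ++ messageelement ++ "</a>"]
          else acc)
        else
          acc ++ [messageelement]) [])
    else markedupmessage
  markedupmessage

-- ===== PORT B =====
-- literal transliteration of B: one split, one loop classifying each token (URL / @ / # / plain).
def markup_message_alt (message : String) (query : String) : String :=
  PySem.Str.join " " (((PySem.Str.split? message " ").getD []).foldl (fun out tok =>
    if PySem.Str.lower (PySem.Str.slice tok none (some 7)) = "http://" then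
      out ++ ["<a href='" ++ tok ++ "' target='_new'>" ++ tok ++ "</a>"]
    else if PySem.Str.startswith tok "@" then
      (if 1 < PySem.Str.len tok then
        out ++ ["<a href='http://twitter.com/" ++ PySem.Str.slice tok (some 1) ++ "' target='_new'>" ++ tok ++ "</a>"]
      else out)
    else if PySem.Str.startswith tok "#" then
      (if 1 < PySem.Str.len tok then
        out ++ ["<a href='http://search.twitter.com/search?q=%23" ++ PySem.Str.slice tok (some 1) ++ "'>" ++ tok ++ "</a>"]
      else out)
    else out ++ [tok]) [])

-- ===== PRECONDITION & SPEC =====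
def Spec_markup_message (message : String) (query : String) (out : String) : Prop := out = markup_message_alt message query
instance (message : String) (query : String) (out : String) : Decidable (Spec_markup_message message query out) := by unfold Spec_markup_message; infer_instance

-- ===== CLAIM (what is proved, stated in full; the proofs are below) =====
def Claim_equal_markup_message : Prop := ∀ (message : String) (query : String), Dom_markup_message message query → Spec_markup_message message query (markup_message message query)

-- ===== LEMMAS AND PROOFS =====

-- ---- basic split/join machinery on List Char ----
def splitSp (l : List Char) : List (List Char) := List.splitOn ' ' l
def joinSp (L : List (List Char)) : List Char := PySem.Chars.join [' '] L

lemma splitSp_ne_nil (l : List Char) : splitSp l ≠ [] := by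
  simpa [splitSp, List.splitOn] using List.splitOnP_ne_nil (fun x => x == ' ') l

lemma modifyHead_nilf (L : List (List Char)) : L.modifyHead (fun h => ([] : List Char) ++ h) = L := by
  cases L <;> simp

lemma modifyHead_idf (L : List (List Char)) : L.modifyHead (fun h => h) = L := by
  cases L <;> simp

lemma go_spec (c : Char) : ∀ (fuel : Nat) (l cur acc : _), l.length < fuel →
    PySem.Chars.splitOn.go [c] fuel l cur acc
      = acc.reverse ++ (List.splitOn c l).modifyHead (fun h => cur.reverse ++ h) := by
  intro fuel
  induction fuel with
  | zero => intro l cur acc h; omega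
  | succ n ih =>
    intro l cur acc h
    cases l with
    | nil =>
      simp [PySem.Chars.splitOn.go, List.splitOn, List.splitOnP_nil]
    | cons x rest =>
      by_cases hx : x = c
      · subst hx
        have hgo : PySem.Chars.splitOn.go [x] (n+1) (x::rest) cur acc
            = PySem.Chars.splitOn.go [x] n rest [] (cur.reverse :: acc) := by
          simp [PySem.Chars.splitOn.go, List.isPrefixOf]
        rw [hgo, ih rest [] _ (by simpa using Nat.lt_of_succ_lt_succ h)]
        have hsp : List.splitOn x (x :: rest) = [] :: List.splitOn x rest := by
          simp [List.splitOn, List.splitOnP_cons]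
        rw [hsp]
        rcases hne : List.splitOn x rest with _ | ⟨hd, tl⟩
        · exact absurd hne (by simpa [List.splitOn] using List.splitOnP_ne_nil (fun y => y == x) rest)
        · simp
      · have hcx : ¬ c = x := fun hh => hx hh.symm
        have hgo : PySem.Chars.splitOn.go [c] (n+1) (x::rest) cur acc
            = PySem.Chars.splitOn.go [c] n rest (x :: cur) acc := by
          simp [PySem.Chars.splitOn.go, List.isPrefixOf, hcx]
        rw [hgo, ih rest (x :: cur) _ (by simpa using Nat.lt_of_succ_lt_succ h)]
        have hsp : List.splitOn c (x :: rest)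
            = (List.splitOn c rest).modifyHead (fun h => x :: h) := by
          simp [List.splitOn, List.splitOnP_cons, hx]
        rw [hsp]
        rcases hne : List.splitOn c rest with _ | ⟨hd, tl⟩
        · exact absurd hne (by simpa [List.splitOn] using List.splitOnP_ne_nil (fun y => y == c) rest)
        · simp

lemma charsSplitOn_single (l : List Char) (c : Char) :
    PySem.Chars.splitOn l [c] = List.splitOn c l := by
  have := go_spec c (l.length + 1) l [] [] (by omega)
  simpa [PySem.Chars.splitOn, modifyHead_nilf, modifyHead_idf] using this

lemma sp_toList : (" " : String).toList = [' '] := rfl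

lemma strSplit_toList (s : String) :
    ((PySem.Str.split? s " ").getD []).map String.toList = splitSp s.toList := by
  have h := PySem.Str.split?_map s " "
  rw [sp_toList] at h
  have h2 : PySem.Chars.split? s.toList [' '] = some (PySem.Chars.splitOn s.toList [' ']) := by
    simp [PySem.Chars.split?]
  rw [h2] at h
  rcases hs : PySem.Str.split? s " " with _ | L
  · rw [hs] at h; simp at h
  · rw [hs] at h; simp at h
    simpa [splitSp, ← charsSplitOn_single] using h

lemma split_nosp (l : List Char) (h : ' ' ∉ l) : splitSp l = [l] := by
  induction l with
  | nil => simp [splitSp, List.splitOn]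
  | cons x rest ih =>
    have hx : ¬ (x == ' ') = true := by
      simp only [beq_iff_eq]; intro hh; exact h (hh ▸ List.mem_cons_self)
    have hr := ih (fun hm => h (List.mem_cons_of_mem _ hm))
    simp only [splitSp, List.splitOn, List.splitOnP_cons] at *
    simp [hx, hr]

lemma splitSp_append (a b : List Char) :
    splitSp (a ++ ' ' :: b) = splitSp a ++ splitSp b := by
  induction a with
  | nil => simp [splitSp, List.splitOn, List.splitOnP_cons, List.splitOnP_nil]
  | cons x a ih =>
    by_cases hx : x = ' '
    · subst hx
      simp only [splitSp, List.splitOn, List.splitOnP_cons, List.cons_append] at *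
      simp [ih]
    · have hx' : ¬ (x == ' ') = true := by simpa using hx
      simp only [splitSp, List.splitOn, List.splitOnP_cons, List.cons_append] at *
      rcases hne : List.splitOnP (fun y => y == ' ') a with _ | ⟨hd, tl⟩
      · exact absurd hne (List.splitOnP_ne_nil _ a)
      · rw [hne] at ih
        simp [hx', ih]

lemma joinSp_splitSp (l : List Char) : joinSp (splitSp l) = l := by
  show [' '].intercalate (List.splitOn ' ' l) = l
  exact List.intercalate_splitOn l ' '

lemma splitSp_joinSp (L : List (List Char)) (hn : L ≠ []) (h : ∀ l ∈ L, ' ' ∉ l) :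
    splitSp (joinSp L) = L := by
  show List.splitOn ' ' ([' '].intercalate L) = L
  exact List.splitOn_intercalate L ' ' h hn

lemma joinSp_cons_cons (a a' : List Char) (u : List (List Char)) :
    joinSp (a :: a' :: u) = a ++ ' ' :: joinSp (a' :: u) := by
  have := PySem.Chars.join_cons_cons [' '] a a' u
  simpa [joinSp] using this

lemma joinSp_append (u v : List (List Char)) (hu : u ≠ []) (hv : v ≠ []) :
    joinSp (u ++ v) = joinSp u ++ ' ' :: joinSp v := by
  induction u with
  | nil => exact absurd rfl hu
  | cons a u ih =>
    cases u with
    | nil =>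
      rcases v with _ | ⟨b, v⟩
      · exact absurd rfl hv
      · simpa [joinSp, PySem.Chars.join_singleton] using joinSp_cons_cons a b v
    | cons a' u' =>
      have hrest := ih (by simp)
      have h1 : joinSp ((a :: a' :: u') ++ v) = a ++ ' ' :: joinSp ((a' :: u') ++ v) := by
        simpa using joinSp_cons_cons a a' (u' ++ v)
      rw [h1, hrest, joinSp_cons_cons]
      simp

lemma split_join_flat (L : List (List Char)) (hn : L ≠ []) :
    splitSp (joinSp L) = L.flatMap splitSp := by
  induction L with
  | nil => exact absurd rfl hn
  | cons l L ih =>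
    cases L with
    | nil => simp [joinSp, PySem.Chars.join_singleton]
    | cons l' L' =>
      rw [joinSp_cons_cons, splitSp_append, ih (by simp)]
      simp

lemma flatMap_splitSp_ne_nil (L : List (List Char)) (hn : L ≠ []) :
    L.flatMap splitSp ≠ [] := by
  rcases L with _ | ⟨l, L⟩
  · exact absurd rfl hn
  · simp only [List.flatMap_cons]
    exact List.append_ne_nil_of_left_ne_nil (splitSp_ne_nil l) _

lemma joinSp_flat (LL : List (List Char)) : joinSp (LL.flatMap splitSp) = joinSp LL := by
  induction LL with
  | nil => rfl
  | cons l LL ih =>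
    cases LL with
    | nil =>
      simp only [List.flatMap_cons, List.flatMap_nil, List.append_nil]
      rw [joinSp_splitSp]
      exact (PySem.Chars.join_singleton [' '] l).symm
    | cons l' L' =>
      have h5 : List.flatMap splitSp (l :: l' :: L') = splitSp l ++ List.flatMap splitSp (l' :: L') :=
        List.flatMap_cons ..
      rw [h5, joinSp_append _ _ (splitSp_ne_nil l) (flatMap_splitSp_ne_nil _ (by simp)),
          joinSp_splitSp, ih, joinSp_cons_cons]

lemma mem_joinSp_infix {l : List Char} {L : List (List Char)} (h : l ∈ L) :
    l <:+: joinSp L := by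
  induction L with
  | nil => simp at h
  | cons a L ih =>
    cases L with
    | nil =>
      simp at h; subst h
      simp [joinSp, PySem.Chars.join_singleton]
    | cons a' L' =>
      rcases List.mem_cons.mp h with rfl | hm
      · rw [joinSp_cons_cons]; exact (List.prefix_append l _).isInfix
      · have := ih hm
        rw [joinSp_cons_cons]
        exact this.trans ((List.suffix_append (a ++ [' ']) _).isInfix.trans (by simp))

lemma mem_splitSp_infix {t l : List Char} (h : t ∈ splitSp l) : t <:+: l := by
  have := mem_joinSp_infix h
  rwa [joinSp_splitSp] at this

lemma splitSp_no_sp' : ∀ (l : List Char), ∀ t ∈ splitSp l, ' ' ∉ t := by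
  intro l
  induction l with
  | nil =>
    intro t h; simp [splitSp, List.splitOn] at h; subst h; simp
  | cons x rest ih =>
    intro t h
    by_cases hx : x = ' '
    · subst hx
      simp only [splitSp, List.splitOn, List.splitOnP_cons, beq_self_eq_true, if_true] at h
      rcases List.mem_cons.mp h with rfl | hm
      · simp
      · exact ih t hm
    · have hx' : ¬ (x == ' ') = true := by simpa using hx
      simp only [splitSp, List.splitOn, List.splitOnP_cons, hx', if_false] at h
      rcases hne : List.splitOnP (fun y => y == ' ') rest with _ | ⟨hd, tl⟩
      · exact absurd hne (List.splitOnP_ne_nil _ rest)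
      · rw [hne] at h
        simp only [List.modifyHead_cons] at h
        have hhd : hd ∈ splitSp rest := by simp [splitSp, List.splitOn, hne]
        rcases List.mem_cons.mp h with rfl | hm
        · intro hmem
          rcases List.mem_cons.mp hmem with h1 | h2
          · exact hx h1.symm
          · exact ih hd hhd h2
        · exact ih t (by simp [splitSp, List.splitOn, hne, hm]) 

lemma splitSp_no_sp {t l : List Char} (h : t ∈ splitSp l) : ' ' ∉ t :=
  splitSp_no_sp' l t h

-- small flatMap helpers (kept local to this file's shapes)
lemma flatMap_single_fun {α β : Type} (k : α → β) (l : List α) :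
    l.flatMap (fun x => [k x]) = l.map k := by
  induction l with
  | nil => rfl
  | cons a l ih => simp [ih]

lemma map_comp' {α β γ : Type} (f : α → β) (g : β → γ) (l : List α) :
    l.map (fun x => g (f x)) = (l.map f).map g := by
  induction l with
  | nil => rfl
  | cons a l ih => simp [ih]

lemma flatMap_map' {α β γ : Type} (f : α → β) (g : β → List γ) (l : List α) :
    (l.map f).flatMap g = l.flatMap (fun x => g (f x)) := by
  induction l with
  | nil => rfl
  | cons a l ih => simp [ih]

lemma flatMap_assoc' {α β γ : Type} (l : List α) (f : α → List β) (g : β → List γ) :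
    (l.flatMap f).flatMap g = l.flatMap (fun x => (f x).flatMap g) := by
  induction l with
  | nil => rfl
  | cons a l ih => simp [ih]

-- ---- token-level functions (chars versions of the two programs' branch logic) ----
def isHttpC (t : List Char) : Bool := PySem.Chars.lower (t.take 7) == "http://".toList
def atC (t : List Char) : Bool := PySem.Chars.lower (t.take 1) == "@".toList
def hashC (t : List Char) : Bool := PySem.Chars.lower (t.take 1) == "#".toList
def wrapU (t : List Char) : List Char :=
  "<a href='".toList ++ (t ++ ("' target='_new'>".toList ++ (t ++ "</a>".toList)))
def wrapA (t : List Char) : List Char :=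
  "<a href='http://twitter.com/".toList ++ (t.tail ++ ("' target='_new'>".toList ++ (t ++ "</a>".toList)))
def wrapH (t : List Char) : List Char :=
  "<a href='http://search.twitter.com/search?q=%23".toList ++ (t.tail ++ ("'>".toList ++ (t ++ "</a>".toList)))
def pieceA : List Char := "<a".toList
def pieceU2 (t : List Char) : List Char := 'h' :: ("ref='".toList ++ (t ++ ['\'']))
def pieceU3 (t : List Char) : List Char := 't' :: ("arget='_new'>".toList ++ (t ++ "</a>".toList))
def pieceV2 (t : List Char) : List Char := 'h' :: ("ref='http://twitter.com/".toList ++ (t.tail ++ ['\'']))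
def pieceW2 (t : List Char) : List Char :=
  'h' :: ("ref='http://search.twitter.com/search?q=%23".toList ++ (t.tail ++ ("'>".toList ++ (t ++ "</a>".toList))))
def f1 (t : List Char) : List Char := if isHttpC t then wrapU t else t
def f2 (t : List Char) : List (List Char) :=
  if atC t then (if 1 < t.length then [wrapA t] else []) else [t]
def f3 (t : List Char) : List (List Char) :=
  if hashC t then (if 1 < t.length then [wrapH t] else []) else [t]
def gB (t : List Char) : List (List Char) :=
  if isHttpC t then [wrapU t]
  else if PySem.Chars.startswith t "@".toList then (if 1 < t.length then [wrapA t] else [])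
  else if PySem.Chars.startswith t "#".toList then (if 1 < t.length then [wrapH t] else [])
  else [t]
def e2 (u : List Char) : List (List Char) := (f2 u).flatMap splitSp
def e3 (u : List Char) : List (List Char) := (f3 u).flatMap splitSp
def step1 (s : List Char) : List Char :=
  if PySem.Chars.isIn "http://".toList (PySem.Chars.lower s) then joinSp ((splitSp s).map f1) else s
def step2 (s : List Char) : List Char :=
  if PySem.Chars.isIn "@".toList s then joinSp ((splitSp s).flatMap f2) else s
def step3 (s : List Char) : List Char :=
  if PySem.Chars.isIn "#".toList s then joinSp ((splitSp s).flatMap f3) else s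

-- ---- character lemmas ----
lemma lowerChar_eq_iff (c d : Char) (hd : d.toNat < 97 ∨ 122 < d.toNat)
    (hd2 : PySem.Chars.lowerChar d = d) : PySem.Chars.lowerChar c = d ↔ c = d := by
  constructor
  · intro h
    by_cases hu : PySem.Chars.isupper c = true
    · exfalso
      have hle : 'A' ≤ c ∧ c ≤ 'Z' := by simpa [PySem.Chars.isupper] using hu
      have h65 : 65 ≤ c.toNat := by
        have := hle.1
        rw [Char.le_def, UInt32.le_iff_toNat_le] at this
        exact this
      have h90 : c.toNat ≤ 90 := by
        have := hle.2
        rw [Char.le_def, UInt32.le_iff_toNat_le] at this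
        exact this
      rw [PySem.Chars.lowerChar, if_pos hu] at h
      have hval : (Char.ofNat (c.toNat + 32)).toNat = c.toNat + 32 := by
        rw [Char.toNat_ofNat, if_pos]
        left; omega
      have hcg := congrArg Char.toNat h
      rw [hval] at hcg
      omega
    · rw [PySem.Chars.lowerChar, if_neg hu] at h; exact h
  · intro h; subst h; exact hd2

lemma lowerChar_at (c : Char) : PySem.Chars.lowerChar c = '@' ↔ c = '@' :=
  lowerChar_eq_iff c '@' (by left; decide) (by decide)

lemma lowerChar_hash (c : Char) : PySem.Chars.lowerChar c = '#' ↔ c = '#' :=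
  lowerChar_eq_iff c '#' (by left; decide) (by decide)

lemma atC_cons (c : Char) (R : List Char) : atC (c :: R) = (c == '@') := by
  by_cases hc : c = '@'
  · subst hc
    rfl
  · have h1 : PySem.Chars.lowerChar c ≠ '@' := fun hh => hc ((lowerChar_at c).mp hh)
    simp [atC, PySem.Chars.lower, hc, h1]

lemma hashC_cons (c : Char) (R : List Char) : hashC (c :: R) = (c == '#') := by
  by_cases hc : c = '#'
  · subst hc
    rfl
  · have h1 : PySem.Chars.lowerChar c ≠ '#' := fun hh => hc ((lowerChar_hash c).mp hh)
    simp [hashC, PySem.Chars.lower, hc, h1]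

lemma startswith_at (t : List Char) : PySem.Chars.startswith t ['@'] = atC t := by
  cases t with
  | nil => decide
  | cons c R =>
    rw [atC_cons]
    show List.isPrefixOf ['@'] (c :: R) = (c == '@')
    simp [List.isPrefixOf, eq_comm]

lemma startswith_hash (t : List Char) : PySem.Chars.startswith t ['#'] = hashC t := by
  cases t with
  | nil => decide
  | cons c R =>
    rw [hashC_cons]
    show List.isPrefixOf ['#'] (c :: R) = (c == '#')
    simp [List.isPrefixOf, eq_comm]

lemma atC_mem {t : List Char} (h : atC t = true) : '@' ∈ t := by
  cases t with
  | nil => exact absurd h (by decide)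
  | cons c R =>
    rw [atC_cons] at h
    have : c = '@' := by simpa using h
    subst this; exact List.mem_cons_self

lemma hashC_mem {t : List Char} (h : hashC t = true) : '#' ∈ t := by
  cases t with
  | nil => exact absurd h (by decide)
  | cons c R =>
    rw [hashC_cons] at h
    have : c = '#' := by simpa using h
    subst this; exact List.mem_cons_self

-- ---- splitting the wrapped tokens back into their space-separated pieces ----
lemma wrapU_decomp (t : List Char) :
    wrapU t = pieceA ++ ' ' :: (pieceU2 t ++ ' ' :: pieceU3 t) := by
  simp only [wrapU, pieceA, pieceU2, pieceU3, List.cons_append, List.append_assoc,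
    List.nil_append]
  rfl

lemma wrapA_decomp (t : List Char) :
    wrapA t = pieceA ++ ' ' :: (pieceV2 t ++ ' ' :: pieceU3 t) := by
  simp only [wrapA, pieceA, pieceV2, pieceU3, List.cons_append, List.append_assoc,
    List.nil_append]
  rfl

lemma wrapH_decomp (t : List Char) :
    wrapH t = pieceA ++ ' ' :: pieceW2 t := by
  simp only [wrapH, pieceA, pieceW2, List.cons_append, List.append_assoc,
    List.nil_append]
  rfl

lemma nosp_pieceA : ' ' ∉ pieceA := by decide
lemma nosp_pieceU2 {t : List Char} (ht : ' ' ∉ t) : ' ' ∉ pieceU2 t := by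
  simp only [pieceU2, List.mem_cons, List.mem_append]
  push_neg
  exact ⟨by decide, by decide, ht, by decide⟩
lemma nosp_pieceU3 {t : List Char} (ht : ' ' ∉ t) : ' ' ∉ pieceU3 t := by
  simp only [pieceU3, List.mem_cons, List.mem_append]
  push_neg
  exact ⟨by decide, by decide, ht, by decide⟩
lemma nosp_tail {t : List Char} (ht : ' ' ∉ t) : ' ' ∉ t.tail :=
  fun h => ht (List.mem_of_mem_tail h)
lemma nosp_pieceV2 {t : List Char} (ht : ' ' ∉ t) : ' ' ∉ pieceV2 t := by
  simp only [pieceV2, List.mem_cons, List.mem_append]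
  push_neg
  exact ⟨by decide, by decide, nosp_tail ht, by decide⟩
lemma nosp_pieceW2 {t : List Char} (ht : ' ' ∉ t) : ' ' ∉ pieceW2 t := by
  simp only [pieceW2, List.mem_cons, List.mem_append]
  push_neg
  exact ⟨by decide, by decide, nosp_tail ht, by decide, ht, by decide⟩

lemma splitSp_wrapU {t : List Char} (ht : ' ' ∉ t) :
    splitSp (wrapU t) = [pieceA, pieceU2 t, pieceU3 t] := by
  rw [wrapU_decomp, splitSp_append, splitSp_append,
    split_nosp _ nosp_pieceA, split_nosp _ (nosp_pieceU2 ht), split_nosp _ (nosp_pieceU3 ht)]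
  rfl

lemma splitSp_wrapA {t : List Char} (ht : ' ' ∉ t) :
    splitSp (wrapA t) = [pieceA, pieceV2 t, pieceU3 t] := by
  rw [wrapA_decomp, splitSp_append, splitSp_append,
    split_nosp _ nosp_pieceA, split_nosp _ (nosp_pieceV2 ht), split_nosp _ (nosp_pieceU3 ht)]
  rfl

lemma splitSp_wrapH {t : List Char} (ht : ' ' ∉ t) :
    splitSp (wrapH t) = [pieceA, pieceW2 t] := by
  rw [wrapH_decomp, splitSp_append,
    split_nosp _ nosp_pieceA, split_nosp _ (nosp_pieceW2 ht)]
  rfl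

-- pieces produced by wrapping never begin with '@' or '#'; passes 2/3 leave them alone
lemma f2_cons_ne (c : Char) (R : List Char) (h : c ≠ '@') : f2 (c :: R) = [c :: R] := by
  have : atC (c :: R) = false := by rw [atC_cons]; simpa using h
  simp [f2, this]
lemma f3_cons_ne (c : Char) (R : List Char) (h : c ≠ '#') : f3 (c :: R) = [c :: R] := by
  have : hashC (c :: R) = false := by rw [hashC_cons]; simpa using h
  simp [f3, this]

lemma e2_piece {u : List Char} (hu : ' ' ∉ u) (h : f2 u = [u]) : e2 u = [u] := by
  simp [e2, h, split_nosp _ hu]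
lemma e3_piece {u : List Char} (hu : ' ' ∉ u) (h : f3 u = [u]) : e3 u = [u] := by
  simp [e3, h, split_nosp _ hu]

-- ---- the token-level heart: A's three passes act on one original token exactly like B's branch ----
lemma tokenE (t : List Char) (ht : ' ' ∉ t) :
    ((splitSp (f1 t)).flatMap e2).flatMap e3 = (gB t).flatMap splitSp := by
  by_cases hH : isHttpC t = true
  · have hf1 : f1 t = wrapU t := by simp [f1, hH]
    rw [hf1, splitSp_wrapU ht]
    have hA2 : e2 pieceA = [pieceA] := e2_piece nosp_pieceA (by decide)
    have hA3 : e3 pieceA = [pieceA] := e3_piece nosp_pieceA (by decide)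
    have hU22 : e2 (pieceU2 t) = [pieceU2 t] :=
      e2_piece (nosp_pieceU2 ht) (f2_cons_ne _ _ (by decide))
    have hU23 : e3 (pieceU2 t) = [pieceU2 t] :=
      e3_piece (nosp_pieceU2 ht) (f3_cons_ne _ _ (by decide))
    have hU32 : e2 (pieceU3 t) = [pieceU3 t] :=
      e2_piece (nosp_pieceU3 ht) (f2_cons_ne _ _ (by decide))
    have hU33 : e3 (pieceU3 t) = [pieceU3 t] :=
      e3_piece (nosp_pieceU3 ht) (f3_cons_ne _ _ (by decide))
    simp [gB, hH, splitSp_wrapU ht, hA2, hA3, hU22, hU23, hU32, hU33]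
  · have hf1 : f1 t = t := by simp [f1, hH]
    rw [hf1, split_nosp _ ht]
    by_cases hA : atC t = true
    · by_cases hL : 1 < t.length
      · have hf2 : f2 t = [wrapA t] := by simp [f2, hA, hL]
        have hA3 : e3 pieceA = [pieceA] := e3_piece nosp_pieceA (by decide)
        have hV23 : e3 (pieceV2 t) = [pieceV2 t] :=
          e3_piece (nosp_pieceV2 ht) (f3_cons_ne _ _ (by decide))
        have hU33 : e3 (pieceU3 t) = [pieceU3 t] :=
          e3_piece (nosp_pieceU3 ht) (f3_cons_ne _ _ (by decide))
        simp [e2, hf2, splitSp_wrapA ht, gB, hH, startswith_at, hA, hL, hA3, hV23, hU33]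
      · have hf2 : f2 t = [] := by simp [f2, hA, hL]
        simp [e2, hf2, gB, hH, startswith_at, hA, hL, e3]
    · by_cases hHs : hashC t = true
      · have hf2 : f2 t = [t] := by simp [f2, hA]
        have he2 : e2 t = [t] := e2_piece ht hf2
        by_cases hL : 1 < t.length
        · have hf3 : f3 t = [wrapH t] := by simp [f3, hHs, hL]
          simp [he2, e3, hf3, splitSp_wrapH ht, gB, hH, startswith_at, startswith_hash, hA, hHs, hL]
        · have hf3 : f3 t = [] := by simp [f3, hHs, hL]
          simp [he2, e3, hf3, gB, hH, startswith_at, startswith_hash, hA, hHs, hL]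
      · have hf2 : f2 t = [t] := by simp [f2, hA]
        have hf3 : f3 t = [t] := by simp [f3, hHs]
        simp [e2_piece ht hf2, e3_piece ht hf3, gB, hH, startswith_at, startswith_hash, hA, hHs,
          split_nosp _ ht]

-- ---- guard elimination: each of A's guarded passes equals its unguarded pass ----
lemma guard1 (s : List Char) : step1 s = joinSp ((splitSp s).map f1) := by
  unfold step1
  by_cases h : PySem.Chars.isIn "http://".toList (PySem.Chars.lower s) = true
  · rw [if_pos h]
  · rw [if_neg h]
    have hni : ¬ "http://".toList <:+: PySem.Chars.lower s := by
      rw [← PySem.Chars.isIn_eq_false_iff]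
      simpa using h
    have hid : ∀ t ∈ splitSp s, f1 t = t := by
      intro t hts
      cases hh : isHttpC t with
      | false => simp [f1, hh]
      | true =>
        exfalso
        have heq : PySem.Chars.lower (t.take 7) = "http://".toList := by
          simpa [isHttpC] using hh
        have hpre : "http://".toList <+: PySem.Chars.lower t := by
          rw [← heq]
          simpa [PySem.Chars.lower, List.map_take] using List.take_prefix 7 (PySem.Chars.lower t)
        have hinf : PySem.Chars.lower t <:+: PySem.Chars.lower s := by
          simpa [PySem.Chars.lower] using (mem_splitSp_infix hts).map PySem.Chars.lowerChar
        exact hni (hpre.isInfix.trans hinf)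
    rw [List.map_congr_left hid]
    simp [joinSp_splitSp]

lemma guard2 (s : List Char) : step2 s = joinSp ((splitSp s).flatMap f2) := by
  unfold step2
  by_cases h : PySem.Chars.isIn "@".toList s = true
  · rw [if_pos h]
  · rw [if_neg h]
    have hmem : '@' ∉ s := by
      intro hm
      rcases List.append_of_mem hm with ⟨l1, l2, rfl⟩
      have hin : "@".toList <:+: l1 ++ '@' :: l2 := ⟨l1, l2, by simp⟩
      rw [← PySem.Chars.isIn_iff_infix] at hin
      exact h hin
    have hid : ∀ t ∈ splitSp s, f2 t = [t] := by
      intro t hts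
      cases hh : atC t with
      | false => simp [f2, hh]
      | true => exact absurd ((mem_splitSp_infix hts).subset (atC_mem hh)) hmem
    rw [List.flatMap_congr hid]
    simp [List.flatMap_singleton', joinSp_splitSp]

lemma guard3 (s : List Char) : step3 s = joinSp ((splitSp s).flatMap f3) := by
  unfold step3
  by_cases h : PySem.Chars.isIn "#".toList s = true
  · rw [if_pos h]
  · rw [if_neg h]
    have hmem : '#' ∉ s := by
      intro hm
      rcases List.append_of_mem hm with ⟨l1, l2, rfl⟩
      have hin : "#".toList <:+: l1 ++ '#' :: l2 := ⟨l1, l2, by simp⟩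
      rw [← PySem.Chars.isIn_iff_infix] at hin
      exact h hin
    have hid : ∀ t ∈ splitSp s, f3 t = [t] := by
      intro t hts
      cases hh : hashC t with
      | false => simp [f3, hh]
      | true => exact absurd ((mem_splitSp_infix hts).subset (hashC_mem hh)) hmem
    rw [List.flatMap_congr hid]
    simp [List.flatMap_singleton', joinSp_splitSp]

-- ---- the chars-level equivalence of the two whole pipelines ----
lemma master (s : List Char) :
    step3 (step2 (step1 s)) = joinSp ((splitSp s).flatMap gB) := by
  set ts := splitSp s with hts
  have hts_ne : ts ≠ [] := splitSp_ne_nil s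
  have hts_nosp : ∀ t ∈ ts, ' ' ∉ t := fun t h => splitSp_no_sp h
  rw [guard1]
  set P1 := ts.map f1 with hP1
  have hP1ne : P1 ≠ [] := by
    simp only [hP1, ne_eq, List.map_eq_nil_iff]; exact hts_ne
  rw [guard2, split_join_flat P1 hP1ne]
  set L2 := (P1.flatMap splitSp).flatMap f2 with hL2
  set P2 := L2.flatMap splitSp with hP2
  have hm2 : joinSp L2 = joinSp P2 := (joinSp_flat L2).symm
  have hP2nosp : ∀ u ∈ P2, ' ' ∉ u := by
    intro u hu
    rw [hP2] at hu
    rcases List.mem_flatMap.mp hu with ⟨w, _, hw2⟩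
    exact splitSp_no_sp hw2
  have hA : step3 (joinSp L2) = joinSp (P2.flatMap e3) := by
    by_cases hL2e : L2 = []
    · rw [guard3]
      rw [hL2e]
      have h1 : joinSp ([] : List (List Char)) = [] := rfl
      rw [h1]
      have h2 : splitSp ([] : List Char) = [[]] := by simp [splitSp, List.splitOn]
      rw [h2]
      have hhc : hashC [] = false := by decide
      have h3 : f3 ([] : List Char) = [[]] := by simp [f3, hhc]
      have h4 : P2 = [] := by rw [hP2, hL2e]; rfl
      simp [h3, h4, joinSp, PySem.Chars.join_singleton]
    · have hP2ne : P2 ≠ [] := by rw [hP2]; exact flatMap_splitSp_ne_nil L2 hL2e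
      rw [guard3, hm2, splitSp_joinSp P2 hP2ne hP2nosp]
      rw [show joinSp (P2.flatMap f3) = joinSp ((P2.flatMap f3).flatMap splitSp) from
        (joinSp_flat _).symm]
      rw [flatMap_assoc']
      rfl
  rw [hA]
  have hchain : P2.flatMap e3 = ts.flatMap (fun t => ((splitSp (f1 t)).flatMap e2).flatMap e3) := by
    simp only [hP2, hL2, hP1]
    simp only [flatMap_map', flatMap_assoc', e2, e3]
  rw [hchain, List.flatMap_congr (fun t hts' => tokenE t (hts_nosp t hts'))]
  rw [show ts.flatMap (fun t => (gB t).flatMap splitSp) = (ts.flatMap gB).flatMap splitSp from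
    (flatMap_assoc' ts gB splitSp).symm]
  exact joinSp_flat _

-- ---- bridging the String-level ports to the chars-level pipelines ----
lemma lenNat (e : String) : e.toList.length = e.length := by simp

lemma sliceTo7 (l : List Char) : PySem.List.slice l none (some 7) = l.take 7 := by
  simpa using PySem.List.slice_to l (b := 7) (by norm_num)

lemma sliceTo1 (l : List Char) : PySem.List.slice l none (some 1) = l.take 1 := by
  simpa using PySem.List.slice_to l (b := 1) (by norm_num)

lemma sliceFrom1 (l : List Char) : PySem.List.slice l (some 1) = l.tail := by
  have := PySem.List.slice_from l (a := 1) (by norm_num)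
  simpa [List.drop_one] using this

lemma slice1len (e : String) :
    PySem.List.slice e.toList (some 1) (some (e.length : Int)) = e.toList.tail := by
  have hl : (e.length : Int) = ((e.toList.length : Nat) : Int) := by rw [lenNat]
  rw [hl]
  have h := PySem.List.slice_natCast e.toList 1 e.toList.length
  have h1 : ((1:Nat) : Int) = (1 : Int) := by norm_num
  rw [h1] at h
  rw [h, List.take_of_length_le (by simp), List.drop_one]

lemma cHttp (e : String) :
    (PySem.Str.lower (PySem.Str.slice e (some 0) (some 7)) = "http://") ↔ isHttpC e.toList = true := by
  rw [String.ext_iff]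
  simp only [PySem.Str.toList_lower, PySem.Str.toList_slice, isHttpC]
  simp [sliceTo7]

lemma cHttpB (e : String) :
    (PySem.Str.lower (PySem.Str.slice e none (some 7)) = "http://") ↔ isHttpC e.toList = true := by
  rw [String.ext_iff]
  simp only [PySem.Str.toList_lower, PySem.Str.toList_slice, isHttpC]
  simp [sliceTo7]

lemma cAt (e : String) :
    (PySem.Str.lower (PySem.Str.slice e (some 0) (some 1)) = "@") ↔ atC e.toList = true := by
  rw [String.ext_iff]
  simp only [PySem.Str.toList_lower, PySem.Str.toList_slice, atC]
  simp [sliceTo1]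

lemma cHash (e : String) :
    (PySem.Str.lower (PySem.Str.slice e (some 0) (some 1)) = "#") ↔ hashC e.toList = true := by
  rw [String.ext_iff]
  simp only [PySem.Str.toList_lower, PySem.Str.toList_slice, hashC]
  simp [sliceTo1]

lemma cLen (e : String) : (1 < PySem.Str.len e) ↔ 1 < e.toList.length := by
  rw [PySem.Str.len_eq]
  exact_mod_cast Iff.rfl

-- the three stages of port A, and port B's single stage, as String → String functions
def stepSA1 (x : String) : String :=
  if PySem.Str.isIn "http://" (PySem.Str.lower x) then
    PySem.Str.join " " (((PySem.Str.split? x " ").getD []).foldl (fun acc messageelement =>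
      if PySem.Str.lower (PySem.Str.slice messageelement (some 0) (some 7)) = "http://" then
        acc ++ ["<a href='" ++ messageelement ++ "' target='_new'>" ++ messageelement ++ "</a>"]
      else
        acc ++ [messageelement]) [])
  else x

def stepSA2 (x : String) : String :=
  if PySem.Str.isIn "@" x then
    PySem.Str.join " " (((PySem.Str.split? x " ").getD []).foldl (fun acc messageelement =>
      if PySem.Str.lower (PySem.Str.slice messageelement (some 0) (some 1)) = "@" then
        (if 1 < PySem.Str.len messageelement then
          acc ++ ["<a href='http://twitter.com/" ++ PySem.Str.slice messageelement (some 1) (some (PySem.Str.len messageelement)) ++ "' target='_new'>" ++ messageelement ++ "</a>"]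
        else acc)
      else
        acc ++ [messageelement]) [])
  else x

def stepSA3 (x : String) : String :=
  if PySem.Str.isIn "#" x then
    PySem.Str.join " " (((PySem.Str.split? x " ").getD []).foldl (fun acc messageelement =>
      if PySem.Str.lower (PySem.Str.slice messageelement (some 0) (some 1)) = "#" then
        (if 1 < PySem.Str.len messageelement then
          acc ++ ["<a href='http://search.twitter.com/search?q=%23" ++ PySem.Str.slice messageelement (some 1) (some (PySem.Str.len messageelement)) ++ "'>" ++ messageelement ++ "</a>"]
        else acc)
      else
        acc ++ [messageelement]) [])
  else x

lemma portA_decomp (m q : String) : markup_message m q = stepSA3 (stepSA2 (stepSA1 m)) := rfl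

lemma stage1S (x : String) : (stepSA1 x).toList = step1 x.toList := by
  unfold stepSA1 step1
  have hc : PySem.Str.isIn "http://" (PySem.Str.lower x)
      = PySem.Chars.isIn "http://".toList (PySem.Chars.lower x.toList) := by
    rw [PySem.Str.isIn_eq, PySem.Str.toList_lower]
  rw [hc]
  by_cases h : PySem.Chars.isIn "http://".toList (PySem.Chars.lower x.toList) = true
  · rw [if_pos h, if_pos h]
    have hbody : (fun (acc : List String) messageelement =>
        if PySem.Str.lower (PySem.Str.slice messageelement (some 0) (some 7)) = "http://" then
          acc ++ ["<a href='" ++ messageelement ++ "' target='_new'>" ++ messageelement ++ "</a>"]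
        else acc ++ [messageelement])
        = (fun (acc : List String) e => acc ++
            (if PySem.Str.lower (PySem.Str.slice e (some 0) (some 7)) = "http://" then
              ["<a href='" ++ e ++ "' target='_new'>" ++ e ++ "</a>"] else [e])) := by
      funext acc e; split <;> rfl
    rw [hbody, PySem.List.foldl_append_eq_flatMap, PySem.Str.toList_join, sp_toList]
    change joinSp _ = joinSp _
    congr 1
    rw [List.nil_append, List.map_flatMap]
    have helem : ∀ e : String,
        ((if PySem.Str.lower (PySem.Str.slice e (some 0) (some 7)) = "http://" then
          ["<a href='" ++ e ++ "' target='_new'>" ++ e ++ "</a>"] else [e]).map String.toList)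
        = [f1 e.toList] := by
      intro e
      by_cases hce : isHttpC e.toList = true
      · rw [if_pos ((cHttp e).mpr hce)]
        simp [f1, hce, wrapU, List.append_assoc]
      · have hcf : isHttpC e.toList = false := by simpa using hce
        rw [if_neg (fun hh => hce ((cHttp e).mp hh))]
        simp [f1, hcf]
    simp only [helem]
    rw [← strSplit_toList x, flatMap_single_fun]
    exact map_comp' String.toList f1 _
  · rw [if_neg h, if_neg h]

lemma stage2S (x : String) : (stepSA2 x).toList = step2 x.toList := by
  unfold stepSA2 step2
  have hc : PySem.Str.isIn "@" x = PySem.Chars.isIn "@".toList x.toList := PySem.Str.isIn_eq _ _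
  rw [hc]
  by_cases h : PySem.Chars.isIn "@".toList x.toList = true
  · rw [if_pos h, if_pos h]
    have hbody : (fun (acc : List String) messageelement =>
        if PySem.Str.lower (PySem.Str.slice messageelement (some 0) (some 1)) = "@" then
          (if 1 < PySem.Str.len messageelement then
            acc ++ ["<a href='http://twitter.com/" ++ PySem.Str.slice messageelement (some 1) (some (PySem.Str.len messageelement)) ++ "' target='_new'>" ++ messageelement ++ "</a>"]
          else acc)
        else acc ++ [messageelement])
        = (fun (acc : List String) e => acc ++
            (if PySem.Str.lower (PySem.Str.slice e (some 0) (some 1)) = "@" then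
              (if 1 < PySem.Str.len e then
                ["<a href='http://twitter.com/" ++ PySem.Str.slice e (some 1) (some (PySem.Str.len e)) ++ "' target='_new'>" ++ e ++ "</a>"]
              else [])
            else [e])) := by
      funext acc e
      split
      · split
        · rfl
        · simp
      · rfl
    rw [hbody, PySem.List.foldl_append_eq_flatMap, PySem.Str.toList_join, sp_toList]
    change joinSp _ = joinSp _
    congr 1
    rw [List.nil_append, List.map_flatMap]
    have helem : ∀ e : String,
        ((if PySem.Str.lower (PySem.Str.slice e (some 0) (some 1)) = "@" then
            (if 1 < PySem.Str.len e then
              ["<a href='http://twitter.com/" ++ PySem.Str.slice e (some 1) (some (PySem.Str.len e)) ++ "' target='_new'>" ++ e ++ "</a>"]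
            else [])
          else [e]).map String.toList)
        = f2 e.toList := by
      intro e
      by_cases hce : atC e.toList = true
      · rw [if_pos ((cAt e).mpr hce)]
        by_cases hl : 1 < e.toList.length
        · have hl' : 1 < e.length := lenNat e ▸ hl
          rw [if_pos ((cLen e).mpr hl)]
          simp [f2, hce, hl, hl', wrapA, slice1len, List.append_assoc]
        · have hl' : ¬ 1 < e.length := fun hh => hl (by rw [lenNat]; exact hh)
          rw [if_neg (fun hh => hl ((cLen e).mp hh))]
          simp [f2, hce, hl, hl']
      · have hcf : atC e.toList = false := by simpa using hce
        rw [if_neg (fun hh => hce ((cAt e).mp hh))]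
        simp [f2, hcf]
    simp only [helem]
    rw [← strSplit_toList x]
    exact (flatMap_map' String.toList f2 _).symm
  · rw [if_neg h, if_neg h]

lemma stage3S (x : String) : (stepSA3 x).toList = step3 x.toList := by
  unfold stepSA3 step3
  have hc : PySem.Str.isIn "#" x = PySem.Chars.isIn "#".toList x.toList := PySem.Str.isIn_eq _ _
  rw [hc]
  by_cases h : PySem.Chars.isIn "#".toList x.toList = true
  · rw [if_pos h, if_pos h]
    have hbody : (fun (acc : List String) messageelement =>
        if PySem.Str.lower (PySem.Str.slice messageelement (some 0) (some 1)) = "#" then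
          (if 1 < PySem.Str.len messageelement then
            acc ++ ["<a href='http://search.twitter.com/search?q=%23" ++ PySem.Str.slice messageelement (some 1) (some (PySem.Str.len messageelement)) ++ "'>" ++ messageelement ++ "</a>"]
          else acc)
        else acc ++ [messageelement])
        = (fun (acc : List String) e => acc ++
            (if PySem.Str.lower (PySem.Str.slice e (some 0) (some 1)) = "#" then
              (if 1 < PySem.Str.len e then
                ["<a href='http://search.twitter.com/search?q=%23" ++ PySem.Str.slice e (some 1) (some (PySem.Str.len e)) ++ "'>" ++ e ++ "</a>"]
              else [])
            else [e])) := by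
      funext acc e
      split
      · split
        · rfl
        · simp
      · rfl
    rw [hbody, PySem.List.foldl_append_eq_flatMap, PySem.Str.toList_join, sp_toList]
    change joinSp _ = joinSp _
    congr 1
    rw [List.nil_append, List.map_flatMap]
    have helem : ∀ e : String,
        ((if PySem.Str.lower (PySem.Str.slice e (some 0) (some 1)) = "#" then
            (if 1 < PySem.Str.len e then
              ["<a href='http://search.twitter.com/search?q=%23" ++ PySem.Str.slice e (some 1) (some (PySem.Str.len e)) ++ "'>" ++ e ++ "</a>"]
            else [])
          else [e]).map String.toList)
        = f3 e.toList := by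
      intro e
      by_cases hce : hashC e.toList = true
      · rw [if_pos ((cHash e).mpr hce)]
        by_cases hl : 1 < e.toList.length
        · have hl' : 1 < e.length := lenNat e ▸ hl
          rw [if_pos ((cLen e).mpr hl)]
          simp [f3, hce, hl, hl', wrapH, slice1len, List.append_assoc]
        · have hl' : ¬ 1 < e.length := fun hh => hl (by rw [lenNat]; exact hh)
          rw [if_neg (fun hh => hl ((cLen e).mp hh))]
          simp [f3, hce, hl, hl']
      · have hcf : hashC e.toList = false := by simpa using hce
        rw [if_neg (fun hh => hce ((cHash e).mp hh))]
        simp [f3, hcf]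
    simp only [helem]
    rw [← strSplit_toList x]
    exact (flatMap_map' String.toList f3 _).symm
  · rw [if_neg h, if_neg h]

lemma A_bridge (m q : String) :
    (markup_message m q).toList = step3 (step2 (step1 m.toList)) := by
  rw [portA_decomp m q, stage3S, stage2S, stage1S]

lemma B_bridge (m q : String) :
    (markup_message_alt m q).toList = joinSp ((splitSp m.toList).flatMap gB) := by
  show (PySem.Str.join " " _).toList = _
  have hbody : (fun (out : List String) tok =>
      if PySem.Str.lower (PySem.Str.slice tok none (some 7)) = "http://" then
        out ++ ["<a href='" ++ tok ++ "' target='_new'>" ++ tok ++ "</a>"]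
      else if PySem.Str.startswith tok "@" then
        (if 1 < PySem.Str.len tok then
          out ++ ["<a href='http://twitter.com/" ++ PySem.Str.slice tok (some 1) ++ "' target='_new'>" ++ tok ++ "</a>"]
        else out)
      else if PySem.Str.startswith tok "#" then
        (if 1 < PySem.Str.len tok then
          out ++ ["<a href='http://search.twitter.com/search?q=%23" ++ PySem.Str.slice tok (some 1) ++ "'>" ++ tok ++ "</a>"]
        else out)
      else out ++ [tok])
      = (fun (out : List String) tok => out ++
          (if PySem.Str.lower (PySem.Str.slice tok none (some 7)) = "http://" then
            ["<a href='" ++ tok ++ "' target='_new'>" ++ tok ++ "</a>"]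
          else if PySem.Str.startswith tok "@" then
            (if 1 < PySem.Str.len tok then
              ["<a href='http://twitter.com/" ++ PySem.Str.slice tok (some 1) ++ "' target='_new'>" ++ tok ++ "</a>"]
            else [])
          else if PySem.Str.startswith tok "#" then
            (if 1 < PySem.Str.len tok then
              ["<a href='http://search.twitter.com/search?q=%23" ++ PySem.Str.slice tok (some 1) ++ "'>" ++ tok ++ "</a>"]
            else [])
          else [tok])) := by
    funext out tok
    split
    · rfl
    · split
      · split
        · rfl
        · simp
      · split
        · split
          · rfl
          · simp
        · rfl
  rw [hbody, PySem.List.foldl_append_eq_flatMap, PySem.Str.toList_join, sp_toList]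
  change joinSp _ = joinSp _
  congr 1
  rw [List.nil_append, List.map_flatMap]
  have helem : ∀ tok : String,
      ((if PySem.Str.lower (PySem.Str.slice tok none (some 7)) = "http://" then
          ["<a href='" ++ tok ++ "' target='_new'>" ++ tok ++ "</a>"]
        else if PySem.Str.startswith tok "@" then
          (if 1 < PySem.Str.len tok then
            ["<a href='http://twitter.com/" ++ PySem.Str.slice tok (some 1) ++ "' target='_new'>" ++ tok ++ "</a>"]
          else [])
        else if PySem.Str.startswith tok "#" then
          (if 1 < PySem.Str.len tok then
            ["<a href='http://search.twitter.com/search?q=%23" ++ PySem.Str.slice tok (some 1) ++ "'>" ++ tok ++ "</a>"]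
          else [])
        else [tok]).map String.toList)
      = gB tok.toList := by
    intro tok
    by_cases hH : isHttpC tok.toList = true
    · rw [if_pos ((cHttpB tok).mpr hH)]
      simp [gB, hH, wrapU, List.append_assoc]
    · have hHf : isHttpC tok.toList = false := by simpa using hH
      rw [if_neg (fun hh => hH ((cHttpB tok).mp hh))]
      by_cases h2 : PySem.Chars.startswith tok.toList ['@'] = true
      · rw [if_pos (by rw [PySem.Str.startswith_eq]; exact h2)]
        by_cases hl : 1 < tok.toList.length
        · have hl' : 1 < tok.length := lenNat tok ▸ hl
          rw [if_pos ((cLen tok).mpr hl)]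
          simp [gB, hHf, h2, hl, hl', wrapA, sliceFrom1, List.append_assoc]
        · have hl' : ¬ 1 < tok.length := fun hh => hl (by rw [lenNat]; exact hh)
          rw [if_neg (fun hh => hl ((cLen tok).mp hh))]
          simp [gB, hHf, h2, hl, hl']
      · have h2f : PySem.Chars.startswith tok.toList ['@'] = false := by simpa using h2
        rw [if_neg (by rw [PySem.Str.startswith_eq]; simpa using h2)]
        by_cases h3 : PySem.Chars.startswith tok.toList ['#'] = true
        · rw [if_pos (by rw [PySem.Str.startswith_eq]; exact h3)]
          by_cases hl : 1 < tok.toList.length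
          · have hl' : 1 < tok.length := lenNat tok ▸ hl
            rw [if_pos ((cLen tok).mpr hl)]
            simp [gB, hHf, h2f, h3, hl, hl', wrapH, sliceFrom1, List.append_assoc]
          · have hl' : ¬ 1 < tok.length := fun hh => hl (by rw [lenNat]; exact hh)
            rw [if_neg (fun hh => hl ((cLen tok).mp hh))]
            simp [gB, hHf, h2f, h3, hl, hl']
        · have h3f : PySem.Chars.startswith tok.toList ['#'] = false := by simpa using h3
          rw [if_neg (by rw [PySem.Str.startswith_eq]; simpa using h3)]
          simp [gB, hHf, h2f, h3f]
  simp only [helem]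
  rw [← strSplit_toList m]
  exact (flatMap_map' String.toList gB _).symm

-- ===== VERDICT (by name: the statement is the Claim_ definition above) =====
theorem markup_message_spec : Claim_equal_markup_message := by
  intro message query _
  unfold Spec_markup_message
  apply String.ext
  rw [A_bridge message query, B_bridge message query, master]
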